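-- pv_equiv track=rewrite | github.com/mklemmingen/ALEE | ALEE_Agent/educational_modules.py | _format_obstacles_for_expert
-- ===== SOURCE A (Python) =====
-- from typing import Dict, Any, Optional
--
-- def _format_obstacles_for_expert(params: Dict[str, Any]) -> str:
--     """Format obstacle parameters for obstacle expert"""
--     obstacles = []
--
--     # Root text obstacles
--     if params.get('p_root_text_obstacle_passive') == 'Enthalten':
--         obstacles.append('Grundtext: Passiv')
--     if params.get('p_root_text_obstacle_negation') == 'Enthalten':
--         obstacles.append('Grundtext: Negation')
--     if params.get('p_root_text_obstacle_complex_np') == 'Enthalten':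
--         obstacles.append('Grundtext: Komplexe Nominalphrasen')
--
--     # Item obstacles
--     for i in range(1, 9):
--         if params.get(f'p_item_{i}_obstacle_passive') == 'Enthalten':
--             obstacles.append(f'Item {i}: Passiv')
--         if params.get(f'p_item_{i}_obstacle_negation') == 'Enthalten':
--             obstacles.append(f'Item {i}: Negation')
--         if params.get(f'p_item_{i}_obstacle_complex_np') == 'Enthalten':
--             obstacles.append(f'Item {i}: Komplexe NP')
--
--     # Instruction obstacles
--     if params.get('p_instruction_obstacle_passive') == 'Enthalten':
--         obstacles.append('Anweisung: Passiv')
--     if params.get('p_instruction_obstacle_complex_np') == 'Enthalten':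
--         obstacles.append('Anweisung: Komplexe NP')
--
--     return '; '.join(obstacles) if obstacles else 'Keine sprachlichen Hindernisse'
-- ===== SOURCE B (Python) =====
-- def _format_obstacles_for_expert(params):
--     """Format obstacle parameters for obstacle expert.
--
--     One scan over params.items() against a key->(rank,label) index built once,
--     then a sort by rank restores the required emission order."""
--     table = {}
--     for suffix, word in (('passive', 'Passiv'), ('negation', 'Negation'),
--                          ('complex_np', 'Komplexe Nominalphrasen')):
--         table[f'p_root_text_obstacle_{suffix}'] = (len(table), f'Grundtext: {word}')
--     for i in range(1, 9):
--         for suffix, word in (('passive', 'Passiv'), ('negation', 'Negation'),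
--                              ('complex_np', 'Komplexe NP')):
--             table[f'p_item_{i}_obstacle_{suffix}'] = (len(table), f'Item {i}: {word}')
--     for suffix, word in (('passive', 'Passiv'), ('complex_np', 'Komplexe NP')):
--         table[f'p_instruction_obstacle_{suffix}'] = (len(table), f'Anweisung: {word}')
--
--     found = [table[k] for k, v in params.items() if v == 'Enthalten' and k in table]
--     found.sort(key=lambda t: t[0])
--     return '; '.join(label for _, label in found) if found else 'Keine sprachlichen Hindernisse'
-- ===== Notes on version B (the rewrite author's own statement) =====
-- stated objective: alternative
-- what changed: Instead of testing all 29 hardcoded keys against the dict, B scans params.items() once against a key->(rank,label) index built once, then sorts the hits by rank to restore the emission order.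
import Mathlib
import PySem

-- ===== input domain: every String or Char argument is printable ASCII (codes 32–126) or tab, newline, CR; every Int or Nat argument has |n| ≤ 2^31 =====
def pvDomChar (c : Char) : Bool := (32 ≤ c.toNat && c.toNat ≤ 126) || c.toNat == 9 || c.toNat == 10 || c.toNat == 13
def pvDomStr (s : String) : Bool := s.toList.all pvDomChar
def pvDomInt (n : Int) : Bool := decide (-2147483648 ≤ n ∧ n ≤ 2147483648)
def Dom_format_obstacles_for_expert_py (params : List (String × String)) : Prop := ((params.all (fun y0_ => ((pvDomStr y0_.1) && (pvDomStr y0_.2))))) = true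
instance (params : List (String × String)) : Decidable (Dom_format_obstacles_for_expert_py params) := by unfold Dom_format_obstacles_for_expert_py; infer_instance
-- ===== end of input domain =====

-- B replaces A's 29 hardcoded dict lookups by ONE scan over params.items() against a
-- key->(rank,label) index built once, followed by a sort by rank (objective: alternative).

-- ===== PORT A =====
-- the obstacles list A accumulates (its sequence of if/append statements and the item loop)
def pvObsA (params : List (String × String)) : List String :=
  let obstacles : List String := []
  let obstacles := if (PySem.Dict.ofList params).get? "p_root_text_obstacle_passive" == some "Enthalten" then obstacles ++ ["Grundtext: Passiv"] else obstacles
  let obstacles := if (PySem.Dict.ofList params).get? "p_root_text_obstacle_negation" == some "Enthalten" then obstacles ++ ["Grundtext: Negation"] else obstacles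
  let obstacles := if (PySem.Dict.ofList params).get? "p_root_text_obstacle_complex_np" == some "Enthalten" then obstacles ++ ["Grundtext: Komplexe Nominalphrasen"] else obstacles
  let obstacles := (PySem.List.pyRange 1 9 1).foldl (fun obstacles i =>
    let obstacles := if (PySem.Dict.ofList params).get? ("p_item_" ++ PySem.Int.toStr i ++ "_obstacle_passive") == some "Enthalten" then obstacles ++ ["Item " ++ PySem.Int.toStr i ++ ": Passiv"] else obstacles
    let obstacles := if (PySem.Dict.ofList params).get? ("p_item_" ++ PySem.Int.toStr i ++ "_obstacle_negation") == some "Enthalten" then obstacles ++ ["Item " ++ PySem.Int.toStr i ++ ": Negation"] else obstacles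
    let obstacles := if (PySem.Dict.ofList params).get? ("p_item_" ++ PySem.Int.toStr i ++ "_obstacle_complex_np") == some "Enthalten" then obstacles ++ ["Item " ++ PySem.Int.toStr i ++ ": Komplexe NP"] else obstacles
    obstacles) obstacles
  let obstacles := if (PySem.Dict.ofList params).get? "p_instruction_obstacle_passive" == some "Enthalten" then obstacles ++ ["Anweisung: Passiv"] else obstacles
  let obstacles := if (PySem.Dict.ofList params).get? "p_instruction_obstacle_complex_np" == some "Enthalten" then obstacles ++ ["Anweisung: Komplexe NP"] else obstacles
  obstacles

def format_obstacles_for_expert_py (params : List (String × String)) : String :=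
  if (pvObsA params).isEmpty then "Keine sprachlichen Hindernisse"
  else PySem.Str.join "; " (pvObsA params)

-- ===== PORT B =====
-- the key -> (rank, label) index B builds once (its three registration loops; rank = len(table))
def pvTableB : PySem.Dict String (Int × String) :=
  let table : PySem.Dict String (Int × String) := PySem.Dict.empty
  let table := ([("passive", "Passiv"), ("negation", "Negation"), ("complex_np", "Komplexe Nominalphrasen")] : List (String × String)).foldl
      (fun t sw => t.insert ("p_root_text_obstacle_" ++ sw.1) ((t.size : Int), "Grundtext: " ++ sw.2)) table
  let table := (PySem.List.pyRange 1 9 1).foldl (fun t i =>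
      ([("passive", "Passiv"), ("negation", "Negation"), ("complex_np", "Komplexe NP")] : List (String × String)).foldl
        (fun t sw => t.insert ("p_item_" ++ PySem.Int.toStr i ++ "_obstacle_" ++ sw.1) ((t.size : Int), "Item " ++ PySem.Int.toStr i ++ ": " ++ sw.2)) t) table
  ([("passive", "Passiv"), ("complex_np", "Komplexe NP")] : List (String × String)).foldl
      (fun t sw => t.insert ("p_instruction_obstacle_" ++ sw.1) ((t.size : Int), "Anweisung: " ++ sw.2)) table

def format_obstacles_for_expert_py_alt (params : List (String × String)) : String :=
  let d := PySem.Dict.ofList params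
  let found := d.items.filterMap (fun kv => if kv.2 == "Enthalten" then pvTableB.get? kv.1 else none)
  let found := PySem.List.sorted found (fun t => t.1)
  if found.isEmpty then "Keine sprachlichen Hindernisse"
  else PySem.Str.join "; " (found.map (fun t => t.2))

-- ===== PRECONDITION & SPEC =====
def Spec_format_obstacles_for_expert_py (params : List (String × String)) (out : String) : Prop := out = format_obstacles_for_expert_py_alt params
instance (params : List (String × String)) (out : String) : Decidable (Spec_format_obstacles_for_expert_py params out) := by unfold Spec_format_obstacles_for_expert_py; infer_instance

-- ===== CLAIM (what is proved, stated in full; the proofs are below) =====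
def Claim_equal_format_obstacles_for_expert_py : Prop := ∀ (params : List (String × String)), Dom_format_obstacles_for_expert_py params → Spec_format_obstacles_for_expert_py params (format_obstacles_for_expert_py params)

-- ===== LEMMAS AND PROOFS =====

-- the per-key test both programs apply, and the target list (table entries whose key maps to 'Enthalten')
def pvHit (params : List (String × String)) (k : String) : Bool :=
  (PySem.Dict.ofList params).get? k == some "Enthalten"

def pvTarget (params : List (String × String)) : List (Int × String) :=
  pvTableB.items.filterMap (fun e => if pvHit params e.1 then some e.2 else none)

def pvRoot : List (String × String) :=
  [("p_root_text_obstacle_passive", "Grundtext: Passiv"),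
   ("p_root_text_obstacle_negation", "Grundtext: Negation"),
   ("p_root_text_obstacle_complex_np", "Grundtext: Komplexe Nominalphrasen")]

def pvTriple (i : Int) : List (String × String) :=
  [("p_item_" ++ PySem.Int.toStr i ++ "_obstacle_passive", "Item " ++ PySem.Int.toStr i ++ ": Passiv"),
   ("p_item_" ++ PySem.Int.toStr i ++ "_obstacle_negation", "Item " ++ PySem.Int.toStr i ++ ": Negation"),
   ("p_item_" ++ PySem.Int.toStr i ++ "_obstacle_complex_np", "Item " ++ PySem.Int.toStr i ++ ": Komplexe NP")]

def pvInstr : List (String × String) :=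
  [("p_instruction_obstacle_passive", "Anweisung: Passiv"),
   ("p_instruction_obstacle_complex_np", "Anweisung: Komplexe NP")]

-- structural facts about the literal table (kernel-computed)
set_option maxRecDepth 200000 in
lemma pv_table_nodup : (pvTableB.items.map Prod.fst).Nodup := by decide

set_option maxRecDepth 200000 in
lemma pv_table_ranks : pvTableB.items.Pairwise (fun a b => a.2.1 < b.2.1) := by decide

set_option maxRecDepth 200000 in
lemma pv_table_spec :
    pvTableB.items.map (fun e => (e.1, e.2.2)) =
      pvRoot ++ (PySem.List.pyRange 1 9 1).flatMap pvTriple ++ pvInstr := by decide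

-- ===== A-side: pvObsA is the spec-order filter of the table =====
lemma pv_body_eq (params : List (String × String)) (obs : List String) (i : Int) :
    (if ((PySem.Dict.ofList params).get? ("p_item_" ++ PySem.Int.toStr i ++ "_obstacle_complex_np") == some "Enthalten") = true then
       (if ((PySem.Dict.ofList params).get? ("p_item_" ++ PySem.Int.toStr i ++ "_obstacle_negation") == some "Enthalten") = true then
          (if ((PySem.Dict.ofList params).get? ("p_item_" ++ PySem.Int.toStr i ++ "_obstacle_passive") == some "Enthalten") = true then
             obs ++ ["Item " ++ PySem.Int.toStr i ++ ": Passiv"] else obs) ++ ["Item " ++ PySem.Int.toStr i ++ ": Negation"]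
        else (if ((PySem.Dict.ofList params).get? ("p_item_" ++ PySem.Int.toStr i ++ "_obstacle_passive") == some "Enthalten") = true then
             obs ++ ["Item " ++ PySem.Int.toStr i ++ ": Passiv"] else obs)) ++ ["Item " ++ PySem.Int.toStr i ++ ": Komplexe NP"]
     else (if ((PySem.Dict.ofList params).get? ("p_item_" ++ PySem.Int.toStr i ++ "_obstacle_negation") == some "Enthalten") = true then
          (if ((PySem.Dict.ofList params).get? ("p_item_" ++ PySem.Int.toStr i ++ "_obstacle_passive") == some "Enthalten") = true then
             obs ++ ["Item " ++ PySem.Int.toStr i ++ ": Passiv"] else obs) ++ ["Item " ++ PySem.Int.toStr i ++ ": Negation"]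
        else (if ((PySem.Dict.ofList params).get? ("p_item_" ++ PySem.Int.toStr i ++ "_obstacle_passive") == some "Enthalten") = true then
             obs ++ ["Item " ++ PySem.Int.toStr i ++ ": Passiv"] else obs)))
    = obs ++ (((pvTriple i).filter (fun kl => pvHit params kl.1)).map (fun kl => kl.2)) := by
  simp only [pvTriple, pvHit, List.filter_cons, List.filter_nil]
  split_ifs <;> simp_all

lemma pv_loop_eq (params : List (String × String)) (l : List Int) (obs : List String) :
    List.foldl (fun obstacles i =>
      if ((PySem.Dict.ofList params).get? ("p_item_" ++ PySem.Int.toStr i ++ "_obstacle_complex_np") == some "Enthalten") = true then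
        (if ((PySem.Dict.ofList params).get? ("p_item_" ++ PySem.Int.toStr i ++ "_obstacle_negation") == some "Enthalten") = true then
           (if ((PySem.Dict.ofList params).get? ("p_item_" ++ PySem.Int.toStr i ++ "_obstacle_passive") == some "Enthalten") = true then
              obstacles ++ ["Item " ++ PySem.Int.toStr i ++ ": Passiv"] else obstacles) ++ ["Item " ++ PySem.Int.toStr i ++ ": Negation"]
         else (if ((PySem.Dict.ofList params).get? ("p_item_" ++ PySem.Int.toStr i ++ "_obstacle_passive") == some "Enthalten") = true then
              obstacles ++ ["Item " ++ PySem.Int.toStr i ++ ": Passiv"] else obstacles)) ++ ["Item " ++ PySem.Int.toStr i ++ ": Komplexe NP"]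
      else (if ((PySem.Dict.ofList params).get? ("p_item_" ++ PySem.Int.toStr i ++ "_obstacle_negation") == some "Enthalten") = true then
           (if ((PySem.Dict.ofList params).get? ("p_item_" ++ PySem.Int.toStr i ++ "_obstacle_passive") == some "Enthalten") = true then
              obstacles ++ ["Item " ++ PySem.Int.toStr i ++ ": Passiv"] else obstacles) ++ ["Item " ++ PySem.Int.toStr i ++ ": Negation"]
         else (if ((PySem.Dict.ofList params).get? ("p_item_" ++ PySem.Int.toStr i ++ "_obstacle_passive") == some "Enthalten") = true then
              obstacles ++ ["Item " ++ PySem.Int.toStr i ++ ": Passiv"] else obstacles))) obs l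
    = obs ++ l.flatMap (fun i => ((pvTriple i).filter (fun kl => pvHit params kl.1)).map (fun kl => kl.2)) := by
  induction l generalizing obs with
  | nil => simp
  | cons a t ih =>
    rw [List.foldl_cons, ih]
    simp only [pv_body_eq]
    simp [List.flatMap_cons]

lemma pv_filter_map_flatMap (l : List Int) (g : Int → List (String × String))
    (p : String × String → Bool) (f : String × String → String) :
    ((l.flatMap g).filter p).map f = l.flatMap (fun x => ((g x).filter p).map f) := by
  induction l with
  | nil => simp
  | cons a t ih => simp [List.filter_append, List.map_append, ih]

-- filter a mapped spec list = filterMap of the table, projected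
lemma pv_filterMap_proj (params : List (String × String)) (t : List (String × (Int × String))) :
    ((t.map (fun e => (e.1, e.2.2))).filter (fun kl => pvHit params kl.1)).map (fun kl => kl.2)
      = (t.filterMap (fun e => if pvHit params e.1 then some e.2 else none)).map (fun e => e.2) := by
  induction t with
  | nil => rfl
  | cons a t ih =>
    simp only [List.map_cons, List.filter_cons, List.filterMap_cons]
    by_cases h : pvHit params a.1 = true <;> simp [h, ih]

lemma pv_obs_eq (params : List (String × String)) :
    pvObsA params = (pvTarget params).map (fun e => e.2) := by
  unfold pvTarget
  rw [← pv_filterMap_proj, pv_table_spec]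
  simp only [List.filter_append, List.map_append, pv_filter_map_flatMap]
  unfold pvObsA
  dsimp only
  rw [pv_loop_eq]
  simp only [pvRoot, pvInstr, pvHit, List.filter_cons, List.filter_nil]
  split_ifs <;> simp

-- ===== B-side: the scan over d.items is a permutation of the target =====
lemma pv_get?_none {ν : Type} (xs : List (String × ν)) (k : String) (h : k ∉ xs.map Prod.fst) :
    (PySem.Dict.mk xs).get? k = none := by
  rw [PySem.Dict.get?_eq_none_iff_not_mem_keys]
  exact h

lemma pv_key_ne {k : String} {e : String × (Int × String)} {t : List (String × (Int × String))}
    (he : e ∈ t) (hn : k ∉ t.map Prod.fst) : (k == e.1) = false := by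
  cases h : (k == e.1) with
  | false => rfl
  | true =>
    have hk : k = e.1 := beq_iff_eq.mp h
    exact absurd (hk.symm ▸ List.mem_map_of_mem he) hn

lemma pv_perm_core (t : List (String × (Int × String))) (ht : (t.map Prod.fst).Nodup) :
    ∀ (xs : List (String × String)), (xs.map Prod.fst).Nodup →
      (xs.filterMap (fun kv => if kv.2 == "Enthalten" then (PySem.Dict.mk t).get? kv.1 else none)).Perm
      (t.filterMap (fun e => if (PySem.Dict.mk xs).get? e.1 == some "Enthalten" then some e.2 else none)) := by
  intro xs
  induction xs with
  | nil =>
    intro _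
    have h0 : ∀ e ∈ t, (if (PySem.Dict.mk ([] : List (String × String))).get? e.1 == some "Enthalten" then some e.2 else (none : Option (Int × String))) = none := by
      intro e _
      rfl
    rw [List.filterMap_nil, List.filterMap_congr h0]
    simp
  | cons kv rest ih =>
    intro hnd
    simp only [List.map_cons, List.nodup_cons] at hnd
    obtain ⟨hk, hrest⟩ := hnd
    have hperm := ih hrest
    rw [List.filterMap_cons]
    by_cases hE : (kv.2 == "Enthalten") = true
    · cases hl : (PySem.Dict.mk t).get? kv.1 with
      | none =>
        have hnot : kv.1 ∉ t.map Prod.fst := by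
          rw [PySem.Dict.get?_eq_none_iff_not_mem_keys] at hl
          exact hl
        have hcong : ∀ e ∈ t,
            (if (PySem.Dict.mk (kv :: rest)).get? e.1 == some "Enthalten" then some e.2 else (none : Option (Int × String)))
            = (if (PySem.Dict.mk rest).get? e.1 == some "Enthalten" then some e.2 else none) := by
          intro e he
          rw [PySem.Dict.get?_mk_cons, pv_key_ne he hnot]
          simp
        rw [List.filterMap_congr hcong]
        simpa [hE, hl] using hperm
      | some rl =>
        have htk : (PySem.Dict.mk t).keys.Nodup := ht
        have hmem : (kv.1, rl) ∈ t :=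
          (PySem.Dict.get?_eq_some_iff_mem_items (PySem.Dict.mk t) kv.1 rl htk).mp hl
        obtain ⟨t1, t2, rfl⟩ := List.append_of_mem hmem
        have hnd' := ht
        rw [List.map_append, List.map_cons, List.nodup_append] at hnd'
        obtain ⟨hnd1, hnd2, hdisj⟩ := hnd'
        have h1 : kv.1 ∉ t1.map Prod.fst := fun hm => hdisj kv.1 hm kv.1 (List.mem_cons_self) rfl
        rw [List.nodup_cons] at hnd2
        have h2 : kv.1 ∉ t2.map Prod.fst := hnd2.1
        have hcong1 : ∀ e ∈ t1,
            (if (PySem.Dict.mk (kv :: rest)).get? e.1 == some "Enthalten" then some e.2 else (none : Option (Int × String)))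
            = (if (PySem.Dict.mk rest).get? e.1 == some "Enthalten" then some e.2 else none) := by
          intro e he
          rw [PySem.Dict.get?_mk_cons, pv_key_ne he h1]
          simp
        have hcong2 : ∀ e ∈ t2,
            (if (PySem.Dict.mk (kv :: rest)).get? e.1 == some "Enthalten" then some e.2 else (none : Option (Int × String)))
            = (if (PySem.Dict.mk rest).get? e.1 == some "Enthalten" then some e.2 else none) := by
          intro e he
          rw [PySem.Dict.get?_mk_cons, pv_key_ne he h2]
          simp
        have hmid : (if (PySem.Dict.mk (kv :: rest)).get? kv.1 == some "Enthalten" then some rl else (none : Option (Int × String))) = some rl := by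
          rw [PySem.Dict.get?_mk_cons]
          simp [(beq_iff_eq).mp hE]
        have hmidr : (if (PySem.Dict.mk rest).get? kv.1 == some "Enthalten" then some rl else (none : Option (Int × String))) = none := by
          rw [pv_get?_none rest kv.1 hk]
          simp
        rw [List.filterMap_append, List.filterMap_cons, List.filterMap_congr hcong1,
            List.filterMap_congr hcong2, hmid]
        simp only [hE, if_true]
        rw [List.filterMap_append, List.filterMap_cons, hmidr] at hperm
        exact (hperm.cons rl).trans List.perm_middle.symm
    · have hcong : ∀ e ∈ t,
          (if (PySem.Dict.mk (kv :: rest)).get? e.1 == some "Enthalten" then some e.2 else (none : Option (Int × String)))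
          = (if (PySem.Dict.mk rest).get? e.1 == some "Enthalten" then some e.2 else none) := by
        intro e he
        cases h : (kv.1 == e.1) with
        | false =>
          rw [PySem.Dict.get?_mk_cons, h]
          simp
        | true =>
          have hk1 : kv.1 = e.1 := beq_iff_eq.mp h
          have hkv : (kv.2 == "Enthalten") = false := by simpa using hE
          rw [PySem.Dict.get?_mk_cons, h, pv_get?_none rest e.1 (hk1 ▸ hk)]
          simp [hkv]
      rw [List.filterMap_congr hcong]
      simpa [hE] using hperm

set_option maxRecDepth 200000 in
lemma pv_found_perm (params : List (String × String)) :
    ((PySem.Dict.ofList params).items.filterMap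
        (fun kv => if kv.2 == "Enthalten" then pvTableB.get? kv.1 else none)).Perm
      (pvTarget params) :=
  pv_perm_core pvTableB.items pv_table_nodup (PySem.Dict.ofList params).items
    (PySem.Dict.nodup_keys_ofList params)

lemma pv_sorted_found (params : List (String × String)) :
    PySem.List.sorted
      ((PySem.Dict.ofList params).items.filterMap
        (fun kv => if kv.2 == "Enthalten" then pvTableB.get? kv.1 else none))
      (fun t => t.1)
    = pvTarget params := by
  apply PySem.List.sorted_eq_of_perm_of_pairwise_lt
  · exact (pv_found_perm params).symm
  · exact List.Pairwise.filterMap _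
      (fun a a' h b hb b' hb' => by
        simp only [ite_eq_iff] at hb hb'
        rcases hb with ⟨_, hb⟩ | ⟨_, hb⟩ <;> rcases hb' with ⟨_, hb'⟩ | ⟨_, hb'⟩ <;>
          simp_all) pv_table_ranks

lemma pv_ports_eq (params : List (String × String)) :
    format_obstacles_for_expert_py params = format_obstacles_for_expert_py_alt params := by
  unfold format_obstacles_for_expert_py format_obstacles_for_expert_py_alt
  dsimp only
  rw [pv_sorted_found, pv_obs_eq]
  by_cases h : (pvTarget params).isEmpty <;> simp [h]

-- ===== VERDICT (by name: the statement is the Claim_ definition above) =====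
theorem format_obstacles_for_expert_py_spec : Claim_equal_format_obstacles_for_expert_py := by
  intro params _
  exact pv_ports_eq params
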